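-- pv_equiv track=rewrite | github.com/avdmerbel/AOC_2024 | AOC2024_day8_solution.py | find_antenna_mapping
-- ===== SOURCE A (Python) =====
-- def find_antenna_mapping(antennas, unique_antennas):
--
--     indices_antenna = []
--
--     for antenna in unique_antennas:
--         antenna_dict = {antenna: {}}
--
--         for index_row, row in enumerate(antennas):
--             for index, value in enumerate(row):
--                 if value == antenna:
--                     antenna_dict[antenna][index_row] = index
--
--         indices_antenna.append(antenna_dict)
--
--     return indices_antenna
-- ===== SOURCE B (Python) =====
-- def find_antenna_mapping(antennas, unique_antennas):
--     # Precompute, per row, a dict char -> last column index (one pass per row),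
--     # then answer each antenna by scanning the row maps instead of the grid.
--     row_maps = [{value: index for index, value in enumerate(row)} for row in antennas]
--     return [{antenna: {index_row: row_map[antenna]
--                        for index_row, row_map in enumerate(row_maps)
--                        if antenna in row_map}}
--             for antenna in unique_antennas]
-- ===== Notes on version B (the rewrite author's own statement) =====
-- stated objective: faster
-- what changed: B makes one pass per row to build a char->last-column dict per row, then answers each unique antenna by scanning only the R row maps, instead of A's full R*C grid re-scan per antenna.
import Mathlib
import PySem

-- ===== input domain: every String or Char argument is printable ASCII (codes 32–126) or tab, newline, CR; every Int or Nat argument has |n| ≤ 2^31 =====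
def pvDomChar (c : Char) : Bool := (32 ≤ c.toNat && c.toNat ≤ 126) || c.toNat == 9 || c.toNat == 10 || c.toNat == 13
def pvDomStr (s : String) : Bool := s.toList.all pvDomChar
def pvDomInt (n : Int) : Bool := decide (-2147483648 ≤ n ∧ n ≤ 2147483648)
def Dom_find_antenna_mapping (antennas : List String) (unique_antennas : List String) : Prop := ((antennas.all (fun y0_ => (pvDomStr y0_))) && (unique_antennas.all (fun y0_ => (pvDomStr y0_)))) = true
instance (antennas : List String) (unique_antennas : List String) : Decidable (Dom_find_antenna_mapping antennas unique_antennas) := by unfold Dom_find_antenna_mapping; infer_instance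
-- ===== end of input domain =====

-- B precomputes a char->last-column dict per row in one pass per row, then answers each
-- unique antenna by scanning only the row maps instead of re-scanning the whole grid (faster, asymptotic).

-- ===== PORT A =====
def find_antenna_mapping (antennas : List String) (unique_antennas : List String) : List (List (String × List (Int × Int))) :=
  unique_antennas.foldl (fun indices_antenna antenna =>
    let antenna_dict : PySem.Dict String (PySem.Dict Int Int) :=
      PySem.Dict.empty.insert antenna PySem.Dict.empty
    let antenna_dict :=
      (PySem.List.enumerate antennas).foldl (fun d p =>
        (PySem.List.enumerate p.2.toList).foldl (fun d q =>
          if String.ofList [q.2] = antenna then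
            -- antenna_dict[antenna][index_row] = index
            d.modify antenna PySem.Dict.empty (fun inner => inner.insert p.1 q.1)
          else d) d) antenna_dict
    indices_antenna ++ [antenna_dict.items.map (fun e => (e.1, e.2.items))]) []

-- ===== PORT B =====
-- {value: index for index, value in enumerate(row)}  (last occurrence wins by dict overwrite)
def pvRowMap (row : String) : PySem.Dict String Int :=
  (PySem.List.enumerate row.toList).foldl (fun d q => d.insert (String.ofList [q.2]) q.1) PySem.Dict.empty

def find_antenna_mapping_alt (antennas : List String) (unique_antennas : List String) : List (List (String × List (Int × Int))) :=
  let row_maps := antennas.map pvRowMap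
  unique_antennas.map (fun antenna =>
    [(antenna,
      ((PySem.List.enumerate row_maps).foldl (fun m p =>
        -- 'if antenna in row_map' guards 'row_map[antenna]': the lookup is some exactly then
        match p.2.get? antenna with
        | some v => m.insert p.1 v
        | none => m) (PySem.Dict.empty : PySem.Dict Int Int)).items)])

-- ===== PRECONDITION & SPEC =====
def Spec_find_antenna_mapping (antennas : List String) (unique_antennas : List String) (out : List (List (String × List (Int × Int)))) : Prop := out = find_antenna_mapping_alt antennas unique_antennas
instance (antennas : List String) (unique_antennas : List String) (out : List (List (String × List (Int × Int)))) : Decidable (Spec_find_antenna_mapping antennas unique_antennas out) := by unfold Spec_find_antenna_mapping; infer_instance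

-- ===== CLAIM =====
def Claim_equal_find_antenna_mapping : Prop := ∀ (antennas : List String) (unique_antennas : List String), Dom_find_antenna_mapping antennas unique_antennas → Spec_find_antenna_mapping antennas unique_antennas (find_antenna_mapping antennas unique_antennas)

-- ===== LEMMAS AND PROOFS =====

-- the grid flattened to (character-as-string, row index, column index) in traversal order
def pvCells (antennas : List String) : List (String × Int × Int) :=
  (PySem.List.enumerate antennas).flatMap (fun p =>
    (PySem.List.enumerate p.2.toList).map (fun q => (String.ofList [q.2], p.1, q.1)))

-- the inner dict A builds for a fixed antenna `a` from a flat cell list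
def pvInner (a : String) (L : List (String × Int × Int)) (inner : PySem.Dict Int Int) : PySem.Dict Int Int :=
  L.foldl (fun i t => if t.1 = a then i.insert t.2.1 t.2.2 else i) inner

-- A-side: the per-antenna fold keeps the one-key dict {a: inner} literally
theorem lemA (a : String) (L : List (String × Int × Int)) (inner : PySem.Dict Int Int) :
    L.foldl (fun d t => if t.1 = a then d.modify a PySem.Dict.empty (fun i => i.insert t.2.1 t.2.2) else d)
      (PySem.Dict.empty.insert a inner)
    = PySem.Dict.empty.insert a (pvInner a L inner) := by
  induction L generalizing inner with
  | nil => rfl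
  | cons t L ih =>
    simp only [List.foldl_cons, pvInner]
    by_cases h : t.1 = a
    · simp only [h, PySem.Dict.modify, PySem.Dict.getD_insert_self]
      rw [show (PySem.Dict.empty.insert a inner).insert a (inner.insert t.2.1 t.2.2)
            = PySem.Dict.empty.insert a (inner.insert t.2.1 t.2.2) from ?_]
      · exact ih _
      · apply PySem.Dict.ext
        rw [PySem.Dict.items_insert_of_contains _ _ (PySem.Dict.contains_insert_self _ _ _),
            PySem.Dict.items_insert_of_not_contains _ _ (PySem.Dict.contains_empty a),
            PySem.Dict.items_insert_of_not_contains _ _ (PySem.Dict.contains_empty a)]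
        have he : (PySem.Dict.empty : PySem.Dict String (PySem.Dict Int Int)).items = [] := rfl
        simp [he]
    · simp only [h, if_false]
      exact ih inner

-- a nested enumerate/enumerate fold is the fold over the flattened cell list
theorem nested_eq_cells {γ : Type} (antennas : List String) (g : γ → String × Int × Int → γ) (init : γ) :
    (PySem.List.enumerate antennas).foldl (fun d p =>
      (PySem.List.enumerate p.2.toList).foldl (fun d q => g d (String.ofList [q.2], p.1, q.1)) d) init
    = (pvCells antennas).foldl g init := by
  rw [pvCells, List.foldl_flatMap]
  simp only [List.foldl_map]

-- last occurrence of antenna `a` in an enumerated char list, as a fold on options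
def pvLastOcc (a : String) (L : List (Int × Char)) (o : Option Int) : Option Int :=
  L.foldl (fun o q => if String.ofList [q.2] = a then some q.1 else o) o

-- the A-side inner row fold collapses to one conditional insert at the row's last occurrence
theorem row_fold_eq (a : String) (i : Int) (L : List (Int × Char)) (o : Option Int) (D : PySem.Dict Int Int) :
    L.foldl (fun D q => if String.ofList [q.2] = a then D.insert i q.1 else D)
      (match o with | some j => D.insert i j | none => D)
    = match pvLastOcc a L o with | some j => D.insert i j | none => D := by
  induction L generalizing o with
  | nil => rfl
  | cons q L ih =>
    simp only [List.foldl_cons, pvLastOcc]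
    by_cases h : String.ofList [q.2] = a
    · have hstep : (if String.ofList [q.2] = a then
          (match o with | some j => D.insert i j | none => D).insert i q.1
          else (match o with | some j => D.insert i j | none => D))
        = (match (some q.1 : Option Int) with | some j => D.insert i j | none => D) := by
        cases o with
        | none => simp [h]
        | some j => simp [h, PySem.Dict.insert_insert_self]
      rw [hstep]
      have := ih (o := some q.1)
      simpa [pvLastOcc, h] using this
    · have := ih (o := o)
      simpa [pvLastOcc, h] using this

-- B-side: the row map's lookup at `a` is the row's last occurrence
theorem rowmap_get (a : String) (L : List (Int × Char)) (d : PySem.Dict String Int) :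
    (L.foldl (fun d q => d.insert (String.ofList [q.2]) q.1) d).get? a
    = pvLastOcc a L (d.get? a) := by
  induction L generalizing d with
  | nil => rfl
  | cons q L ih =>
    simp only [List.foldl_cons, pvLastOcc] at *
    rw [ih]
    congr 1
    rw [PySem.Dict.get?_insert]
    by_cases h : String.ofList [q.2] = a
    · rw [if_pos h.symm, if_pos h]
    · rw [if_neg (fun hh => h hh.symm), if_neg h]

-- enumerate commutes with map
theorem enumerate_map {α β : Type} (f : α → β) (xs : List α) (s : Int) :
    PySem.List.enumerate (xs.map f) s = (PySem.List.enumerate xs s).map (fun p => (p.1, f p.2)) := by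
  induction xs generalizing s with
  | nil => rfl
  | cons x xs ih => simp [PySem.List.enumerate_cons, ih]

-- the two inner dicts coincide: A's flat grid fold equals B's fold over the row maps
theorem inner_eq (antennas : List String) (a : String) :
    pvInner a (pvCells antennas) PySem.Dict.empty
    = (PySem.List.enumerate (antennas.map pvRowMap)).foldl (fun m p =>
        match p.2.get? a with
        | some v => m.insert p.1 v
        | none => m) (PySem.Dict.empty : PySem.Dict Int Int) := by
  rw [pvInner, ← nested_eq_cells antennas
        (fun i t => if t.1 = a then i.insert t.2.1 t.2.2 else i) PySem.Dict.empty,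
      enumerate_map, List.foldl_map]
  apply PySem.List.foldl_congr_mem
  intro D p _
  have h1 : (pvRowMap p.2).get? a = pvLastOcc a (PySem.List.enumerate p.2.toList) none := by
    rw [pvRowMap, rowmap_get, PySem.Dict.get?_empty]
  have h2 := row_fold_eq a p.1 (PySem.List.enumerate p.2.toList) none D
  simp only [h1]
  exact h2

theorem per_antenna (antennas : List String) (a : String) :
    ((PySem.List.enumerate antennas).foldl (fun d p =>
        (PySem.List.enumerate p.2.toList).foldl (fun d q =>
          if String.ofList [q.2] = a then
            d.modify a PySem.Dict.empty (fun inner => inner.insert p.1 q.1)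
          else d) d) (PySem.Dict.empty.insert a PySem.Dict.empty)).items.map (fun e => (e.1, e.2.items))
    = [(a,
      ((PySem.List.enumerate (antennas.map pvRowMap)).foldl (fun m p =>
        match p.2.get? a with
        | some v => m.insert p.1 v
        | none => m) (PySem.Dict.empty : PySem.Dict Int Int)).items)] := by
  have hA : (PySem.List.enumerate antennas).foldl (fun d p =>
        (PySem.List.enumerate p.2.toList).foldl (fun d q =>
          if String.ofList [q.2] = a then
            d.modify a PySem.Dict.empty (fun inner => inner.insert p.1 q.1)
          else d) d) (PySem.Dict.empty.insert a PySem.Dict.empty)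
      = (pvCells antennas).foldl
          (fun d t => if t.1 = a then d.modify a PySem.Dict.empty (fun i => i.insert t.2.1 t.2.2) else d)
          (PySem.Dict.empty.insert a PySem.Dict.empty) :=
    nested_eq_cells antennas
      (fun d t => if t.1 = a then d.modify a PySem.Dict.empty (fun i => i.insert t.2.1 t.2.2) else d)
      (PySem.Dict.empty.insert a PySem.Dict.empty)
  rw [hA, lemA, ← inner_eq,
      PySem.Dict.items_insert_of_not_contains _ _ (PySem.Dict.contains_empty a)]
  rfl

-- ===== VERDICT =====
theorem find_antenna_mapping_spec : Claim_equal_find_antenna_mapping := by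
  intro antennas unique_antennas _
  unfold Spec_find_antenna_mapping find_antenna_mapping find_antenna_mapping_alt
  rw [PySem.List.foldl_append_singleton_eq_map]
  simp only [List.nil_append]
  apply List.map_congr_left
  intro a _
  exact per_antenna antennas a
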